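-- pv_equiv track=rewrite | github.com/Lateily/Alpha-Research | scripts/multi_method_valuation.py | _triangulate_signals
-- ===== SOURCE A (Python) =====
-- SIGNAL_TO_INT = {"OVERPRICED": -1, "FAIRLY_VALUED": 0, "UNDERPRICED": 1}
--
-- INT_TO_SIGNAL = {-1: "OVERPRICED", 0: "FAIRLY_VALUED", 1: "UNDERPRICED"}
--
-- INSUFFICIENT_DATA = "INSUFFICIENT_DATA"
--
-- def _triangulate_signals(signals: list) -> str:
--     """Median-of-signals with variable-N support + n=2 consensus-only.
--
--     Args:
--         signals: list of length 3 with values in {UNDERPRICED, FAIRLY_VALUED,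
--                  OVERPRICED, None}. None means method unavailable for this
--                  ticker.
--
--     Returns:
--         Triangulated signal enum: UNDERPRICED, FAIRLY_VALUED, OVERPRICED,
--         or INSUFFICIENT_DATA.
--
--     Algorithm:
--         n=0: INSUFFICIENT_DATA
--         n=1: that single signal directly
--         n=2: consensus-only (both agree → that signal; disagree → FAIRLY_VALUED)
--         n=3: standard median (sorted middle value)
--     """
--     valid = [s for s in signals if s is not None]
--     n = len(valid)
--     if n == 0:
--         return INSUFFICIENT_DATA
--     if n == 1:
--         return valid[0]
--     numeric = sorted([SIGNAL_TO_INT[s] for s in valid])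
--     if n == 2:
--         # Consensus-only rounding (P3-ii from KR3 KR_APPROVAL):
--         # both agree → that signal; disagree → FAIRLY_VALUED [unvalidated intuition]
--         if numeric[0] == numeric[1]:
--             return INT_TO_SIGNAL[numeric[0]]
--         return INT_TO_SIGNAL[0]  # FAIRLY_VALUED
--     # n == 3: standard median (middle of sorted values)
--     return INT_TO_SIGNAL[numeric[1]]
-- ===== SOURCE B (Python) =====
-- SIGNAL_TO_INT = {"OVERPRICED": -1, "FAIRLY_VALUED": 0, "UNDERPRICED": 1}
--
-- INSUFFICIENT_DATA = "INSUFFICIENT_DATA"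
--
-- def _triangulate_signals(signals: list) -> str:
--     """Counting-based triangulation: no sort, no INT_TO_SIGNAL table."""
--     valid = [s for s in signals if s is not None]
--     n = len(valid)
--     if n == 0:
--         return INSUFFICIENT_DATA
--     if n == 1:
--         return valid[0]
--     nums = [SIGNAL_TO_INT[s] for s in valid]
--     neg = nums.count(-1)
--     pos = nums.count(1)
--     if n == 2:
--         if neg == 2:
--             return "OVERPRICED"
--         if pos == 2:
--             return "UNDERPRICED"
--         return "FAIRLY_VALUED"
--     # n >= 3: the element at sorted position 1, located by counting
--     if neg >= 2:
--         return "OVERPRICED"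
--     if n - pos >= 2:
--         return "FAIRLY_VALUED"
--     return "UNDERPRICED"
-- ===== Notes on version B (the rewrite author's own statement) =====
-- stated objective: alternative
-- what changed: B drops the sort and both lookup-table reads: it counts the -1/0/1 codes once and picks the consensus (n=2) or the element at sorted position 1 (n>=3) by comparing the counts, returning string literals directly.
import Mathlib
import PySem

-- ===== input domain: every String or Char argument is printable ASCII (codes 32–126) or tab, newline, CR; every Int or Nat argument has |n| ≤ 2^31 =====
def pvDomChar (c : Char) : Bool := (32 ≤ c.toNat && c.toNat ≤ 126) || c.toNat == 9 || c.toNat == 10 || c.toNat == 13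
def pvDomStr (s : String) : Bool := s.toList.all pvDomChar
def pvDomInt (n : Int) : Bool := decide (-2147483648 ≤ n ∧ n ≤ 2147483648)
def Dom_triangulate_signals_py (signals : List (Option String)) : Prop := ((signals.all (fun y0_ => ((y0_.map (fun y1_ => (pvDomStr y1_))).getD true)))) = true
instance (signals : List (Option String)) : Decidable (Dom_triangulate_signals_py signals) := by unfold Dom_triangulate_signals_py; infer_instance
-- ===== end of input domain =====

-- B replaces A's sort-then-index median with branch-free counting (count of -1/0/1); return-value equivalence only.

-- ===== PORT A =====
-- module dict SIGNAL_TO_INT; lookup of a missing key raises KeyError in Python — excluded by Pre_, the port defaults to 0 there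
def SIGNAL_TO_INT : PySem.Dict String Int :=
  PySem.Dict.ofList [("OVERPRICED", -1), ("FAIRLY_VALUED", 0), ("UNDERPRICED", 1)]
def sigInt (s : String) : Int := (SIGNAL_TO_INT.get? s).getD 0
-- module dict INT_TO_SIGNAL; under Pre_ every lookup key is in {-1,0,1}, the default "" is never used
def INT_TO_SIGNAL : PySem.Dict Int String :=
  PySem.Dict.ofList [(-1, "OVERPRICED"), (0, "FAIRLY_VALUED"), (1, "UNDERPRICED")]
def intToSignal (n : Int) : String := (INT_TO_SIGNAL.get? n).getD ""

-- A's body after 'valid = [s for s in signals if s is not None]'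
def triangulate_signals_py_body (valid : List String) : String :=
  let n := valid.length
  if n = 0 then "INSUFFICIENT_DATA"
  else if n = 1 then (PySem.List.pyGet? valid 0).getD ""
  else
    let numeric := PySem.List.sorted (valid.map sigInt) (fun x => x) false
    if n = 2 then
      if (PySem.List.pyGet? numeric 0).getD 0 = (PySem.List.pyGet? numeric 1).getD 0 then
        intToSignal ((PySem.List.pyGet? numeric 0).getD 0)
      else intToSignal 0
    else intToSignal ((PySem.List.pyGet? numeric 1).getD 0)

def triangulate_signals_py (signals : List (Option String)) : String :=
  triangulate_signals_py_body (signals.filterMap id)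

-- ===== PORT B =====
-- B's body after the same filter
def triangulate_signals_py_alt_body (valid : List String) : String :=
  let n := valid.length
  if n = 0 then "INSUFFICIENT_DATA"
  else if n = 1 then (PySem.List.pyGet? valid 0).getD ""
  else
    let nums := valid.map sigInt
    let neg := PySem.List.count nums (-1)
    let pos := PySem.List.count nums 1
    if n = 2 then
      if neg = 2 then "OVERPRICED"
      else if pos = 2 then "UNDERPRICED"
      else "FAIRLY_VALUED"
    else
      if 2 ≤ neg then "OVERPRICED"
      else if 2 ≤ n - pos then "FAIRLY_VALUED"
      else "UNDERPRICED"

def triangulate_signals_py_alt (signals : List (Option String)) : String :=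
  triangulate_signals_py_alt_body (signals.filterMap id)

-- ===== PRECONDITION & SPEC =====
-- Pre_ excludes exactly the inputs where Python raises KeyError: two or more valid signals and one of them
-- is not a key of SIGNAL_TO_INT (with 0 or 1 valid signals the dict is never consulted).
def Pre_triangulate_signals_py (signals : List (Option String)) : Prop :=
  (signals.filterMap id).length ≤ 1 ∨
    ∀ s ∈ signals.filterMap id, s = "OVERPRICED" ∨ s = "FAIRLY_VALUED" ∨ s = "UNDERPRICED"
instance (signals : List (Option String)) : Decidable (Pre_triangulate_signals_py signals) := by
  unfold Pre_triangulate_signals_py; infer_instance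

def pvWitness_triangulate_signals_py : List (Option String) :=
  [some "UNDERPRICED", none, some "OVERPRICED", some "UNDERPRICED"]

def Spec_triangulate_signals_py (signals : List (Option String)) (out : String) : Prop := out = triangulate_signals_py_alt signals
instance (signals : List (Option String)) (out : String) : Decidable (Spec_triangulate_signals_py signals out) := by unfold Spec_triangulate_signals_py; infer_instance

-- ===== CLAIM (what is proved, stated in full; the proofs are below) =====
def Claim_equal_triangulate_signals_py : Prop := ∀ (signals : List (Option String)), Dom_triangulate_signals_py signals → Pre_triangulate_signals_py signals → Spec_triangulate_signals_py signals (triangulate_signals_py signals)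

-- ===== LEMMAS AND PROOFS =====

theorem pvWitness_ok :
    Dom_triangulate_signals_py pvWitness_triangulate_signals_py ∧
    Pre_triangulate_signals_py pvWitness_triangulate_signals_py := by decide

-- counts of a {-1,0,1}-valued list sum to its length
theorem counts_sum (nums : List Int) (h : ∀ x ∈ nums, x = -1 ∨ x = 0 ∨ x = 1) :
    nums.count (-1) + nums.count 0 + nums.count 1 = nums.length := by
  induction nums with
  | nil => simp
  | cons a t ih =>
    have ha := h a (by simp)
    have ih' := ih (fun x hx => h x (by simp [hx]))
    rcases ha with h1 | h1 | h1 <;> subst h1 <;> simp <;> omega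

-- the sorted form of a {-1,0,1}-valued list, named by its counts
theorem sorted_eq_replicate (nums : List Int) (h : ∀ x ∈ nums, x = -1 ∨ x = 0 ∨ x = 1) :
    PySem.List.sorted nums (fun x => x) false =
      List.replicate (nums.count (-1)) (-1) ++ List.replicate (nums.count 0) 0 ++
        List.replicate (nums.count 1) 1 := by
  apply PySem.List.sorted_id_eq_of_perm_of_pairwise
  · rw [List.perm_iff_count]
    intro a
    by_cases ha : a = -1 ∨ a = 0 ∨ a = 1
    · rcases ha with h1 | h1 | h1 <;> subst h1 <;>
        simp [List.count_append, List.count_replicate]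
    · rw [not_or, not_or] at ha
      have hz : nums.count a = 0 :=
        List.count_eq_zero_of_not_mem (fun hm => by rcases h a hm with h1 | h1 | h1 <;> simp_all)
      simp [List.count_append, List.count_replicate, hz]
      omega
  · refine List.pairwise_append.2 ⟨List.pairwise_append.2 ⟨?_, ?_, ?_⟩, ?_, ?_⟩
    · exact List.pairwise_replicate.2 (Or.inr le_rfl)
    · exact List.pairwise_replicate.2 (Or.inr le_rfl)
    · intro a ha b hb
      rw [List.mem_replicate] at ha hb
      omega
    · exact List.pairwise_replicate.2 (Or.inr le_rfl)
    · intro a ha b hb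
      rw [List.mem_append] at ha
      rw [List.mem_replicate] at hb
      rcases ha with ha | ha <;> rw [List.mem_replicate] at ha <;> omega

-- xs[1] and xs[0] on an explicit cons-cons list
theorem pyGet1_cons (a b : Int) (t : List Int) :
    (PySem.List.pyGet? (a :: b :: t) 1).getD 0 = b := by
  have h1 : (1 : Int) = ((1 : Nat) : Int) := rfl
  rw [h1, PySem.List.pyGet?_natCast]
  rfl

-- the heart of the argument: both branch structures agree, for arbitrary counts neg/zer/pos
theorem core (neg zer pos n : Nat) (hge : 2 ≤ n) (hsum : neg + zer + pos = n) :
    (if n = 2 then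
      if (PySem.List.pyGet? (List.replicate neg (-1) ++ List.replicate zer 0 ++ List.replicate pos 1) 0).getD 0
          = (PySem.List.pyGet? (List.replicate neg (-1) ++ List.replicate zer 0 ++ List.replicate pos 1) 1).getD 0 then
        intToSignal ((PySem.List.pyGet? (List.replicate neg (-1) ++ List.replicate zer 0 ++ List.replicate pos 1) 0).getD 0)
      else intToSignal 0
    else
      intToSignal ((PySem.List.pyGet? (List.replicate neg (-1) ++ List.replicate zer 0 ++ List.replicate pos 1) 1).getD 0))
    = (if n = 2 then
        if neg = 2 then "OVERPRICED" else if pos = 2 then "UNDERPRICED" else "FAIRLY_VALUED"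
      else
        if 2 ≤ neg then "OVERPRICED" else if 2 ≤ n - pos then "FAIRLY_VALUED" else "UNDERPRICED") := by
  by_cases hn2 : n = 2
  · -- n = 2: enumerate the count triples summing to 2
    subst hn2
    have hb1 : neg ≤ 2 := by omega
    have hb2 : zer ≤ 2 := by omega
    have hb3 : pos ≤ 2 := by omega
    interval_cases neg <;> interval_cases zer <;> interval_cases pos <;>
      first
      | omega
      | decide
  · -- n ≥ 3
    simp only [hn2, if_false]
    have h3 : 3 ≤ n := by omega
    rcases Nat.lt_or_ge neg 2 with hneglt | hnegge
    · rcases Nat.lt_or_ge (neg + zer) 2 with hnzlt | hnzge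
      · -- second-smallest is 1: fewer than two non-positive signals
        obtain ⟨k, hk⟩ : ∃ k, pos = k + 2 := ⟨pos - 2, by omega⟩
        subst hk
        rw [if_neg (by omega), if_neg (by omega)]
        have hb2 : zer ≤ 1 := by omega
        interval_cases neg <;> interval_cases zer <;>
          first
          | omega
          | (simp only [List.replicate_succ, List.replicate_zero, List.cons_append,
               List.nil_append, pyGet1_cons]
             decide)
      · -- second-smallest is 0
        rw [if_neg (by omega), if_pos (by omega)]
        interval_cases neg
        · obtain ⟨m, hm⟩ : ∃ m, zer = m + 2 := ⟨zer - 2, by omega⟩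
          subst hm
          simp only [List.replicate_succ, List.replicate_zero, List.cons_append,
            List.nil_append, pyGet1_cons]
          decide
        · obtain ⟨m, hm⟩ : ∃ m, zer = m + 1 := ⟨zer - 1, by omega⟩
          subst hm
          simp only [List.replicate_succ, List.replicate_zero, List.cons_append,
            List.nil_append, pyGet1_cons]
          decide
    · -- second-smallest is -1: at least two OVERPRICED
      obtain ⟨k, hk⟩ : ∃ k, neg = k + 2 := ⟨neg - 2, by omega⟩
      subst hk
      rw [if_pos (by omega)]
      simp only [List.replicate_succ, List.cons_append, pyGet1_cons]
      decide

-- the two bodies agree on every valid-list free of unknown signal names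
theorem body_eq (valid : List String)
    (h : valid.length ≤ 1 ∨ ∀ s ∈ valid, s = "OVERPRICED" ∨ s = "FAIRLY_VALUED" ∨ s = "UNDERPRICED") :
    triangulate_signals_py_body valid = triangulate_signals_py_alt_body valid := by
  rcases Nat.lt_or_ge valid.length 2 with hlt | hge
  · -- n = 0 or n = 1: the two bodies take the same first branches
    unfold triangulate_signals_py_body triangulate_signals_py_alt_body
    interval_cases h : valid.length <;> simp
  · have hall : ∀ s ∈ valid, s = "OVERPRICED" ∨ s = "FAIRLY_VALUED" ∨ s = "UNDERPRICED" := by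
      rcases h with h | h
      · omega
      · exact h
    have hmem : ∀ x ∈ valid.map sigInt, x = -1 ∨ x = 0 ∨ x = 1 := by
      intro x hx
      obtain ⟨s, hs, rfl⟩ := List.mem_map.1 hx
      rcases hall s hs with h1 | h1 | h1 <;> subst h1 <;> decide
    have hsort := sorted_eq_replicate (valid.map sigInt) hmem
    have hsum := counts_sum (valid.map sigInt) hmem
    rw [List.length_map] at hsum
    have hn0 : ¬ valid.length = 0 := by omega
    have hn1 : ¬ valid.length = 1 := by omega
    unfold triangulate_signals_py_body triangulate_signals_py_alt_body
    simp only [PySem.List.count_eq, hsort, hn0, hn1, if_false]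
    exact core _ _ _ _ hge hsum

-- ===== VERDICT (by name: the statement is the Claim_ definition above) =====
theorem triangulate_signals_py_spec : Claim_equal_triangulate_signals_py := by
  intro signals _ hpre
  unfold Spec_triangulate_signals_py triangulate_signals_py triangulate_signals_py_alt
  exact body_eq _ hpre
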